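-- pv_equiv track=rewrite | github.com/xingyu-liu/brainana | macacaMRIprep/utils/bids.py | create_bids_filename
-- ===== SOURCE A (Python) =====
-- from typing import Dict, Optional, Union, Any, List
--
-- BIDS_ENTITY_ORDER = [
--     'sub', 'ses', 'task', 'acq', 'ce', 'dir', 'rec', 'run', 'echo',
--     'flip', 'inv', 'mt', 'part', 'recording', 'space', 'split', 'desc'
-- ]
--
-- def create_bids_filename(entities: Dict[str, str], suffix: str, extension: str = ".nii.gz") -> str:
--     """
--     Create a BIDS-compliant filename from entities dictionary.
--
--     Args:
--         entities: Dictionary of BIDS entities (key-value pairs)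
--         suffix: BIDS suffix (e.g., 'T1w', 'bold', 'desc-brain_T1w')
--         extension: File extension (default: '.nii.gz')
--
--     Returns:
--         BIDS-compliant filename
--
--     Examples:
--         >>> create_bids_filename({'sub': '01', 'ses': 'pre'}, 'T1w')
--         'sub-01_ses-pre_T1w.nii.gz'
--
--         >>> create_bids_filename({'sub': '01', 'run': '1'}, 'desc-brain_T1w')
--         'sub-01_run-1_desc-brain_T1w.nii.gz'
--     """
--     # Use the standard BIDS entity order
--
--     # Build filename components in proper order
--     components = []
--
--     # Add entities in standard order first
--     for entity in BIDS_ENTITY_ORDER: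
--         if entity in entities:
--             components.append(f"{entity}-{entities[entity]}")
--
--     # Add any remaining entities not in the standard order
--     remaining_entities = set(entities.keys()) - set(BIDS_ENTITY_ORDER)
--     for entity in sorted(remaining_entities):  # Sort for consistency
--         components.append(f"{entity}-{entities[entity]}")
--
--     # Join components and add suffix and extension
--     filename = "_".join(components)
--     if filename:
--         filename += f"_{suffix}{extension}"
--     else:
--         filename = f"{suffix}{extension}"
--
--     return filename
-- ===== SOURCE B (Python) =====
-- BIDS_ENTITY_ORDER = [
--     'sub', 'ses', 'task', 'acq', 'ce', 'dir', 'rec', 'run', 'echo',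
--     'flip', 'inv', 'mt', 'part', 'recording', 'space', 'split', 'desc'
-- ]
--
-- def create_bids_filename(entities, suffix, extension=".nii.gz"):
--     # One sorted pass over the keys: known entities in BIDS order first,
--     # unknown ones after them, alphabetically.
--     pos = {name: i for i, name in enumerate(BIDS_ENTITY_ORDER)}
--     n = len(BIDS_ENTITY_ORDER)
--     ordered = sorted(entities, key=lambda k: (pos.get(k, n), k))
--     parts = [f"{k}-{entities[k]}" for k in ordered]
--     parts.append(f"{suffix}{extension}")
--     return "_".join(parts)
-- ===== Notes on version B (the rewrite author's own statement) =====
-- stated objective: simpler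
-- what changed: A builds components in two shaped phases (walk the fixed entity-order list with membership tests, then sort the set of leftover keys) plus an empty-filename branch; B makes one sorted pass over the dict keys with a tuple key (position-or-max, name) and joins components together with the suffix in a single join, removing both the second phase and the branch.
import Mathlib
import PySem

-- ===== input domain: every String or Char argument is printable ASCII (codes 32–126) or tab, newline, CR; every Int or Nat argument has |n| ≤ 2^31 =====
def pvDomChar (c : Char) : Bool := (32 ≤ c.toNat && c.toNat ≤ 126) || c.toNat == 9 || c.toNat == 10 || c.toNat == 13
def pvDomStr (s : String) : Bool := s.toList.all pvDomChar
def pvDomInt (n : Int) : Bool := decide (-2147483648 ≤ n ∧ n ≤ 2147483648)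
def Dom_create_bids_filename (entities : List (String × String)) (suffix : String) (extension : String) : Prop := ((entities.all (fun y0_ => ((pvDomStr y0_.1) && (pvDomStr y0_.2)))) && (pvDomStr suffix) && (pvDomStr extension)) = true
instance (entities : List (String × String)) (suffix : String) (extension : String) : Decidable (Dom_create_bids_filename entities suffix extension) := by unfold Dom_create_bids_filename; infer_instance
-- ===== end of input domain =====

-- B replaces A's two shaped phases (fixed-order walk with membership tests, then sort
-- of the leftover key set) and its empty-filename branch by ONE sorted pass over the
-- dict keys with the tuple key (position-or-max, name), joining the suffix in the
-- same join. Return-value equivalence; neither version mutates its arguments.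

-- ===== PORT A =====
def BIDS_ENTITY_ORDER : List String :=
  ["sub", "ses", "task", "acq", "ce", "dir", "rec", "run", "echo",
   "flip", "inv", "mt", "part", "recording", "space", "split", "desc"]

def create_bids_filename (entities : List (String × String)) (suffix : String) (extension : String) : String :=
  let d : PySem.Dict String String := PySem.Dict.mk entities
  -- for entity in BIDS_ENTITY_ORDER: if entity in entities: components.append(f"{entity}-{entities[entity]}")
  -- (entities[entity] is guarded by the membership test, so getD with a dummy default is exact here)
  let components : List String :=
    List.foldl (fun acc entity =>
      if d.contains entity then acc ++ [entity ++ "-" ++ d.getD entity ""] else acc)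
      [] BIDS_ENTITY_ORDER
  -- remaining_entities = set(entities.keys()) - set(BIDS_ENTITY_ORDER)
  let remaining : PySem.Set String :=
    PySem.Set.diff (PySem.Set.ofList d.keys) (PySem.Set.ofList BIDS_ENTITY_ORDER)
  -- for entity in sorted(remaining_entities): components.append(f"{entity}-{entities[entity]}")
  let components2 : List String :=
    List.foldl (fun acc entity => acc ++ [entity ++ "-" ++ d.getD entity ""]) components
      (PySem.List.sorted remaining (fun k => k))
  let filename := PySem.Str.join "_" components2
  if filename ≠ "" then filename ++ "_" ++ suffix ++ extension
  else suffix ++ extension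

-- ===== PORT B =====
-- pos = {name: i for i, name in enumerate(BIDS_ENTITY_ORDER)}
def pvPos : PySem.Dict String Int :=
  List.foldl (fun p iv => p.insert iv.2 iv.1) PySem.Dict.empty (PySem.List.enumerate BIDS_ENTITY_ORDER)

-- pos.get(k, n)  with n = len(BIDS_ENTITY_ORDER): first component of the tuple key
def pvK1 (k : String) : Int := pvPos.getD k (BIDS_ENTITY_ORDER.length : Int)

def create_bids_filename_alt (entities : List (String × String)) (suffix : String) (extension : String) : String :=
  let d : PySem.Dict String String := PySem.Dict.mk entities
  -- sorted(entities, key=lambda k: (pos.get(k, n), k))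
  let ordered := PySem.List.sorted2 d.keys pvK1 (fun k => k)
  let parts := ordered.map (fun k => k ++ "-" ++ d.getD k "") ++ [suffix ++ extension]
  PySem.Str.join "_" parts

-- ===== PRECONDITION & SPEC =====
-- entities models a Python dict, whose keys are necessarily distinct: an association
-- list with a duplicated key corresponds to no actual dict input of A, so Pre_ keeps
-- only the dict-like lists (first-match lookup and set-of-keys reasoning then agree).
def Pre_create_bids_filename (entities : List (String × String)) (suffix : String) (extension : String) : Prop :=
  (entities.map Prod.fst).Nodup
instance (entities : List (String × String)) (suffix : String) (extension : String) : Decidable (Pre_create_bids_filename entities suffix extension) := by unfold Pre_create_bids_filename; infer_instance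

def pvWitness_create_bids_filename : (List (String × String)) × String × String :=
  ([("sub", "01"), ("zzz", "3"), ("run", "1")], "T1w", ".nii.gz")

def Spec_create_bids_filename (entities : List (String × String)) (suffix : String) (extension : String) (out : String) : Prop := out = create_bids_filename_alt entities suffix extension
instance (entities : List (String × String)) (suffix : String) (extension : String) (out : String) : Decidable (Spec_create_bids_filename entities suffix extension out) := by unfold Spec_create_bids_filename; infer_instance

-- ===== CLAIM (what is proved, stated in full; the proofs are below) =====
def Claim_equal_create_bids_filename : Prop := ∀ (entities : List (String × String)) (suffix : String) (extension : String), Dom_create_bids_filename entities suffix extension → Pre_create_bids_filename entities suffix extension → Spec_create_bids_filename entities suffix extension (create_bids_filename entities suffix extension)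

-- ===== LEMMAS AND PROOFS =====

-- the strict lexicographic order B's tuple key induces on key names
def pvLex (a b : String) : Prop := pvK1 a < pvK1 b ∨ (pvK1 a = pvK1 b ∧ a < b)

lemma pvLex_asymm {a b : String} (h : pvLex a b) : ¬ pvLex b a := by
  rcases h with h | ⟨h1, h2⟩ <;> rintro (g | ⟨g1, g2⟩)
  · exact absurd h (lt_asymm g)
  · omega
  · omega
  · exact absurd h2 (lt_asymm g2)

lemma pvLex_trans {a b c : String} (h1 : pvLex a b) (h2 : pvLex b c) : pvLex a c := by
  rcases h1 with h1 | ⟨h1, h1'⟩ <;> rcases h2 with h2 | ⟨h2, h2'⟩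
  · exact Or.inl (lt_trans h1 h2)
  · exact Or.inl (by omega)
  · exact Or.inl (by omega)
  · exact Or.inr ⟨by omega, lt_trans h1' h2'⟩

lemma pvLex_total {a b : String} (h1 : ¬ pvLex a b) (h2 : ¬ pvLex b a) : a = b := by
  by_contra hne
  rcases lt_trichotomy (pvK1 a) (pvK1 b) with hk | hk | hk
  · exact h1 (Or.inl hk)
  · rcases lt_trichotomy a b with hs | hs | hs
    · exact h1 (Or.inr ⟨hk, hs⟩)
    · exact hne hs
    · exact h2 (Or.inr ⟨hk.symm, hs⟩)
  · exact h2 (Or.inl hk)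

-- the comparison sorted2 runs is exactly pvLex
def pvBefore (a b : String) : Bool :=
  decide (pvK1 a < pvK1 b) || !decide (pvK1 b < pvK1 a) && decide (a < b)

lemma pvBefore_iff (a b : String) : pvBefore a b = true ↔ pvLex a b := by
  simp only [pvBefore, pvLex, Bool.or_eq_true, Bool.and_eq_true, Bool.not_eq_true',
    decide_eq_true_eq, decide_eq_false_iff_not]
  constructor
  · rintro (h | ⟨h1, h2⟩)
    · exact Or.inl h
    · rcases lt_trichotomy (pvK1 a) (pvK1 b) with h | h | h
      · exact Or.inl h
      · exact Or.inr ⟨h, h2⟩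
      · exact absurd h h1
  · rintro (h | ⟨h1, h2⟩)
    · exact Or.inl h
    · exact Or.inr ⟨by omega, h2⟩

-- inserting with pvBefore preserves the sortedness invariant
lemma pvInsert_pw (x : String) (ys : List String)
    (h : ys.Pairwise (fun a b => ¬ pvLex b a)) :
    (PySem.List.insertBy pvBefore x ys).Pairwise (fun a b => ¬ pvLex b a) := by
  induction ys with
  | nil => simp [PySem.List.insertBy]
  | cons y ys ih =>
      rw [List.pairwise_cons] at h
      rw [PySem.List.insertBy.eq_2]
      by_cases hb : pvBefore x y = true
      · rw [if_pos hb]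
        have hxy : pvLex x y := (pvBefore_iff x y).mp hb
        refine List.Pairwise.cons ?_ (List.Pairwise.cons h.1 h.2)
        intro z hz
        rcases List.mem_cons.mp hz with rfl | hz
        · exact pvLex_asymm hxy
        · intro hzx
          exact h.1 z hz (pvLex_trans hzx hxy)
      · rw [if_neg hb]
        refine List.Pairwise.cons ?_ (ih h.2)
        intro z hz
        rcases (PySem.List.insertBy_mem_iff pvBefore x z ys).mp hz with rfl | hz
        · exact fun hl => hb ((pvBefore_iff z y).mpr hl)
        · exact h.1 z hz

lemma pvFoldl_pw (xs acc : List String) (h : acc.Pairwise (fun a b => ¬ pvLex b a)) :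
    (List.foldl (fun acc x => PySem.List.insertBy pvBefore x acc) acc xs).Pairwise
      (fun a b => ¬ pvLex b a) := by
  induction xs generalizing acc with
  | nil => exact h
  | cons x xs ih => exact ih _ (pvInsert_pw x acc h)

lemma pvSorted2_unfold (xs : List String) :
    PySem.List.sorted2 xs pvK1 (fun k => k)
      = List.foldl (fun acc x => PySem.List.insertBy pvBefore x acc) [] xs := rfl

-- sorted2 returns the unique pvLex-increasing rearrangement
lemma pvSorted2_eq (xs ys : List String) (hperm : ys.Perm xs) (hpw : ys.Pairwise pvLex) :
    PySem.List.sorted2 xs pvK1 (fun k => k) = ys := by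
  refine List.eq_of_perm_of_sorted (le := fun a b => ¬ pvLex b a) ?_ ?_ ?_ ?_
  · intro a b _ _ h1 h2
    exact pvLex_total h2 h1
  · rw [pvSorted2_unfold]
    exact pvFoldl_pw xs [] (by simp)
  · exact hpw.imp pvLex_asymm
  · exact (PySem.List.sorted2_perm xs pvK1 (fun k => k) false).trans hperm.symm

lemma pvBIDS_nodup : BIDS_ENTITY_ORDER.Nodup := by decide

lemma pvBIDS_pairwise : BIDS_ENTITY_ORDER.Pairwise (fun a b => pvK1 a < pvK1 b) := by decide

lemma pvBIDS_k1_lt : ∀ a ∈ BIDS_ENTITY_ORDER, pvK1 a < 17 := by decide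

lemma pvPos_keys : pvPos.keys = BIDS_ENTITY_ORDER := by decide

lemma pvK1_notmem {b : String} (hb : b ∉ BIDS_ENTITY_ORDER) : pvK1 b = 17 := by
  have hnone : pvPos.get? b = none := by
    rw [PySem.Dict.get?_eq_none_iff_not_mem_keys, pvPos_keys]; exact hb
  have := PySem.Dict.getD_of_get?_eq_none pvPos (BIDS_ENTITY_ORDER.length : Int) hnone
  simpa [pvK1] using this

-- the crux: B's single sorted pass produces A's two blocks, for duplicate-free keys
lemma pvKeySplit (keys : List String) (hnd : keys.Nodup) :
    PySem.List.sorted2 keys pvK1 (fun k => k)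
      = BIDS_ENTITY_ORDER.filter (fun e => decide (e ∈ keys))
        ++ PySem.List.sorted (keys.filter (fun x => !BIDS_ENTITY_ORDER.contains x)) (fun k => k) := by
  apply pvSorted2_eq
  · -- permutation with keys
    have h1 : (BIDS_ENTITY_ORDER.filter (fun e => decide (e ∈ keys))).Perm
        (keys.filter (fun x => BIDS_ENTITY_ORDER.contains x)) := by
      rw [List.perm_ext_iff_of_nodup (pvBIDS_nodup.filter _) (hnd.filter _)]
      intro a
      simp [List.mem_filter, and_comm]
    have h2 := PySem.List.sorted_perm (keys.filter (fun x => !BIDS_ENTITY_ORDER.contains x)) (fun k => k) false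
    exact (h1.append h2).trans (List.filter_append_perm _ keys)
  · -- strict pairwise pvLex
    rw [List.pairwise_append]
    refine ⟨(pvBIDS_pairwise.filter _).imp Or.inl, ?_, ?_⟩
    · have hperm := PySem.List.sorted_perm (keys.filter (fun x => !BIDS_ENTITY_ORDER.contains x)) (fun k => k) false
      have hnd2 : (PySem.List.sorted (keys.filter (fun x => !BIDS_ENTITY_ORDER.contains x)) (fun k => k)).Nodup :=
        hperm.symm.nodup (hnd.filter _)
      have hle := PySem.List.sorted_pairwise (keys.filter (fun x => !BIDS_ENTITY_ORDER.contains x)) (fun k => k)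
      refine (hle.and hnd2).imp_of_mem ?_
      intro a b hma hmb hab
      have hna : a ∉ BIDS_ENTITY_ORDER := by
        have := (PySem.List.mem_sorted _ _ _ a).mp hma
        simp [List.mem_filter] at this; exact this.2
      have hnb : b ∉ BIDS_ENTITY_ORDER := by
        have := (PySem.List.mem_sorted _ _ _ b).mp hmb
        simp [List.mem_filter] at this; exact this.2
      exact Or.inr ⟨by rw [pvK1_notmem hna, pvK1_notmem hnb],
        lt_of_le_of_ne hab.1 hab.2⟩
    · intro a hma b hmb
      have haB : a ∈ BIDS_ENTITY_ORDER := (List.mem_filter.mp hma).1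
      have hnb : b ∉ BIDS_ENTITY_ORDER := by
        have := (PySem.List.mem_sorted _ _ _ b).mp hmb
        simp [List.mem_filter] at this; exact this.2
      exact Or.inl (by rw [pvK1_notmem hnb]; exact pvBIDS_k1_lt a haB)

lemma pvCharsJoinSnoc (sep x c : List Char) (rest : List (List Char)) :
    PySem.Chars.join sep ((c :: rest) ++ [x])
      = PySem.Chars.join sep (c :: rest) ++ sep ++ x := by
  induction rest generalizing c with
  | nil => simp [PySem.Chars.join_cons_cons, PySem.Chars.join_singleton]
  | cons r rs ih =>
      rw [show (c :: r :: rs) ++ [x] = c :: r :: (rs ++ [x]) from rfl,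
          PySem.Chars.join_cons_cons,
          show (r :: (rs ++ [x])) = (r :: rs) ++ [x] from rfl, ih r,
          PySem.Chars.join_cons_cons]
      simp [List.append_assoc]

lemma pvJoinShape (cs : List String) (x : String) (h : ∀ c ∈ cs, c.toList ≠ []) :
    (if PySem.Str.join "_" cs ≠ "" then PySem.Str.join "_" cs ++ "_" ++ x else x)
      = PySem.Str.join "_" (cs ++ [x]) := by
  cases cs with
  | nil =>
      have hnil : PySem.Str.join "_" ([] : List String) = "" := by
        rw [← String.toList_inj]; simp [PySem.Str.toList_join, PySem.Chars.join_nil]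
      rw [hnil]
      simp only [ne_eq, not_true_eq_false, if_false]
      rw [← String.toList_inj]
      simp [PySem.Str.toList_join, PySem.Chars.join_singleton]
  | cons c rest =>
      have hne : (PySem.Str.join "_" (c :: rest)).toList ≠ [] := by
        rw [PySem.Str.toList_join]
        cases rest with
        | nil => simpa [PySem.Chars.join_singleton] using h c (by simp)
        | cons r rs =>
            rw [List.map_cons, List.map_cons, PySem.Chars.join_cons_cons]
            simp only [ne_eq, List.append_eq_nil_iff, List.append_assoc]
            intro hc
            exact h c (by simp) hc.1
      have hne' : PySem.Str.join "_" (c :: rest) ≠ "" := by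
        intro heq; apply hne; rw [heq]; rfl
      rw [if_pos hne', ← String.toList_inj]
      simp only [String.toList_append, PySem.Str.toList_join, List.map_append, List.map_cons,
        List.map_nil]
      rw [pvCharsJoinSnoc]

lemma pvComponentNonempty (d : PySem.Dict String String) (k : String) :
    (k ++ "-" ++ d.getD k "").toList ≠ [] := by
  simp

-- ===== VERDICT (by name: the statement is the Claim_ definition above) =====
theorem create_bids_filename_spec : Claim_equal_create_bids_filename := by
  intro entities suffix extension _hdom hpre
  unfold Spec_create_bids_filename create_bids_filename create_bids_filename_alt
  simp only []
  set d : PySem.Dict String String := PySem.Dict.mk entities with hd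
  have hkeys : d.keys = entities.map Prod.fst := rfl
  have hnd : d.keys.Nodup := by rw [hkeys]; exact hpre
  set f : String → String := fun k => k ++ "-" ++ d.getD k "" with hf
  -- A's two loops as filter/map blocks
  rw [PySem.List.foldl_append_if (fun e => d.contains e) f,
      PySem.List.foldl_append_singleton_eq_map]
  -- the remaining-set as a plain filter of the (duplicate-free) key list
  have hofB : PySem.Set.ofList BIDS_ENTITY_ORDER = BIDS_ENTITY_ORDER :=
    PySem.Set.ofList_eq_self_of_nodup _ pvBIDS_nodup
  have hofK : PySem.Set.ofList d.keys = d.keys :=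
    PySem.Set.ofList_eq_self_of_nodup _ hnd
  have hdiff : PySem.Set.diff (PySem.Set.ofList d.keys) (PySem.Set.ofList BIDS_ENTITY_ORDER)
      = d.keys.filter (fun x => !BIDS_ENTITY_ORDER.contains x) := by
    rw [hofB, hofK]; rfl
  have hp : (fun e => d.contains e) = (fun e => decide (e ∈ d.keys)) := by
    funext e; rw [PySem.Dict.contains_eq_decide_mem_keys]
  rw [hdiff, hp, pvKeySplit d.keys hnd, List.nil_append, ← List.map_append]
  have hne : ∀ c ∈ List.map f
      (BIDS_ENTITY_ORDER.filter (fun e => decide (e ∈ d.keys))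
        ++ PySem.List.sorted (d.keys.filter (fun x => !BIDS_ENTITY_ORDER.contains x)) (fun k => k)),
      c.toList ≠ [] := by
    intro c hc
    simp only [List.mem_map] at hc
    obtain ⟨k, _, hk⟩ := hc
    rw [← hk]
    exact pvComponentNonempty d k
  conv_lhs => rw [String.append_assoc]
  exact pvJoinShape _ (suffix ++ extension) hne
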